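-- pv_equiv track=rewrite | github.com/agarwalaman598/job-application-assistant | backend/app/services/ai_service.py | _best_option_match
-- ===== SOURCE A (Python) =====
-- def _best_option_match(value: str, options: list) -> str:
--     """
--     Snap an AI-returned value to the closest option in the list.
--     1. Exact match (case-insensitive)
--     2. Option that contains the value, or value contains the option
--     3. First option that shares the most words with the value
--     Returns "" if no reasonable match found.
--     """
--     if not value or not options:
--         return value
--
--     val_lower = value.lower().strip()
--
--     # 1. Exact match
--     for opt in options:
--         if opt.lower().strip() == val_lower:
--             return opt
--
--     # 2. Containment
--     for opt in options:
--         opt_lower = opt.lower().strip()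
--         if val_lower in opt_lower or opt_lower in val_lower:
--             return opt
--
--     # 3. Word overlap scoring
--     val_words = set(val_lower.split())
--     best_opt, best_score = "", 0
--     for opt in options:
--         shared = val_words & set(opt.lower().split())
--         if len(shared) > best_score:
--             best_score = len(shared)
--             best_opt = opt
--
--     # Only accept if at least one word overlaps
--     return best_opt if best_score > 0 else ""
-- ===== SOURCE B (Python) =====
-- def _key(val_lower, val_words, opt):
--     """Priority key for one option: exact > containment > word-overlap count."""
--     opt_lower = opt.lower().strip()
--     if opt_lower == val_lower:
--         return (3, 0)
--     if val_lower in opt_lower or opt_lower in val_lower: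
--         return (2, 0)
--     c = len(val_words & set(opt.lower().split()))
--     return (1, c) if c > 0 else (0, 0)
--
--
-- def _best_option_match(value: str, options: list) -> str:
--     # Single pass: track the best (key, option); strict '>' keeps the earliest winner.
--     if not value or not options:
--         return value
--     val_lower = value.lower().strip()
--     val_words = set(val_lower.split())
--     best_opt, best_key = "", (0, 0)
--     for opt in options:
--         k = _key(val_lower, val_words, opt)
--         if k > best_key:
--             best_key, best_opt = k, opt
--     return best_opt if best_key > (0, 0) else ""
-- ===== Notes on version B (the rewrite author's own statement) =====
-- stated objective: alternative
-- what changed: A's three sequential scans (exact match, containment, word-overlap scoring) are merged into a single pass that computes a priority key per option and tracks the running maximum with strict '>' so the earliest best option wins.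
import Mathlib
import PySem

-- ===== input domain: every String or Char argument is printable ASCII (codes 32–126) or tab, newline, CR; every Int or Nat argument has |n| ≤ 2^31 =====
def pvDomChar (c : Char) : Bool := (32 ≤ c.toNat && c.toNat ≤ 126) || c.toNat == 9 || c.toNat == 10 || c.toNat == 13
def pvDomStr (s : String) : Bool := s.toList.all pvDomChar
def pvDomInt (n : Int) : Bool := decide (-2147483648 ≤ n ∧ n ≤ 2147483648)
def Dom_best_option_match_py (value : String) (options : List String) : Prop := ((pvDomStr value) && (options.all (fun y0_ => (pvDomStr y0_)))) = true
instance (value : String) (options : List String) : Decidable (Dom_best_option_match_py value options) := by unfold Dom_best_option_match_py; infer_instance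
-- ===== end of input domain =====

-- B replaces A's three sequential scans (exact, containment, word-overlap) by a single pass that
-- tracks the running maximum of a per-option priority key; objective: alternative (one pass, same result).

-- ===== PORT A =====
-- literal transliteration of _best_option_match: three passes, each 'for … return' is a find?,
-- the scoring loop is a foldl over (best_opt, best_score)
def best_option_match_py (value : String) (options : List String) : String :=
  if value = "" ∨ options = [] then value
  else
    let val_lower := PySem.Str.strip (PySem.Str.lower value)
    match options.find? (fun opt => PySem.Str.strip (PySem.Str.lower opt) == val_lower) with
    | some opt => opt
    | none =>
      match options.find? (fun opt =>
          let opt_lower := PySem.Str.strip (PySem.Str.lower opt)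
          PySem.Str.isIn val_lower opt_lower || PySem.Str.isIn opt_lower val_lower) with
      | some opt => opt
      | none =>
        let val_words : PySem.Set String := PySem.Set.ofList (PySem.Str.split₀ val_lower)
        let r := options.foldl (fun (acc : String × Int) opt =>
          let shared := PySem.Set.inter val_words (PySem.Set.ofList (PySem.Str.split₀ (PySem.Str.lower opt)))
          if PySem.Set.len shared > acc.2 then (opt, PySem.Set.len shared) else acc) ("", (0 : Int))
        if r.2 > 0 then r.1 else ""

-- ===== PORT B =====
-- port of Source B's _key: priority key of one option
def pvKey (val_lower : String) (val_words : PySem.Set String) (opt : String) : Int × Int :=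
  let opt_lower := PySem.Str.strip (PySem.Str.lower opt)
  if opt_lower == val_lower then (3, 0)
  else if PySem.Str.isIn val_lower opt_lower || PySem.Str.isIn opt_lower val_lower then (2, 0)
  else
    let c := PySem.Set.len (PySem.Set.inter val_words (PySem.Set.ofList (PySem.Str.split₀ (PySem.Str.lower opt))))
    if c > 0 then (1, c) else (0, 0)

-- Python's '>' on pairs of ints: lexicographic strict greater
def pvGt (a b : Int × Int) : Bool := a.1 > b.1 || (a.1 == b.1 && a.2 > b.2)

def best_option_match_py_alt (value : String) (options : List String) : String :=
  if value = "" ∨ options = [] then value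
  else
    let val_lower := PySem.Str.strip (PySem.Str.lower value)
    let val_words : PySem.Set String := PySem.Set.ofList (PySem.Str.split₀ val_lower)
    let r := options.foldl (fun (acc : String × (Int × Int)) opt =>
      let k := pvKey val_lower val_words opt
      if pvGt k acc.2 then (opt, k) else acc) ("", (0, 0))
    if pvGt r.2 (0, 0) then r.1 else ""

-- ===== PRECONDITION & SPEC =====
def Spec_best_option_match_py (value : String) (options : List String) (out : String) : Prop := out = best_option_match_py_alt value options
instance (value : String) (options : List String) (out : String) : Decidable (Spec_best_option_match_py value options out) := by unfold Spec_best_option_match_py; infer_instance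

-- ===== CLAIM (what is proved, stated in full; the proofs are below) =====
def Claim_equal_best_option_match_py : Prop := ∀ (value : String) (options : List String), Dom_best_option_match_py value options → Spec_best_option_match_py value options (best_option_match_py value options)

-- ===== LEMMAS AND PROOFS =====

-- named forms of the tests and loop bodies appearing in the two ports (definitionally equal to them)
def exP (v opt : String) : Bool := PySem.Str.strip (PySem.Str.lower opt) == v
def coP (v opt : String) : Bool :=
  PySem.Str.isIn v (PySem.Str.strip (PySem.Str.lower opt)) ||
  PySem.Str.isIn (PySem.Str.strip (PySem.Str.lower opt)) v
def ovC (vw : PySem.Set String) (opt : String) : Int :=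
  PySem.Set.len (PySem.Set.inter vw (PySem.Set.ofList (PySem.Str.split₀ (PySem.Str.lower opt))))
def stepA (vw : PySem.Set String) (acc : String × Int) (opt : String) : String × Int :=
  if ovC vw opt > acc.2 then (opt, ovC vw opt) else acc
def stepB (v : String) (vw : PySem.Set String) (acc : String × (Int × Int)) (opt : String) :
    String × (Int × Int) :=
  if pvGt (pvKey v vw opt) acc.2 then (opt, pvKey v vw opt) else acc

theorem pvKey_spec (v : String) (vw : PySem.Set String) (opt : String) :
    pvKey v vw opt =
      if exP v opt then (3, 0)
      else if coP v opt then (2, 0)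
      else if ovC vw opt > 0 then (1, ovC vw opt) else (0, 0) := rfl

theorem key_fst_le_one (v : String) (vw : PySem.Set String) (x : String)
    (he : exP v x = false) (hc : coP v x = false) : (pvKey v vw x).1 ≤ 1 := by
  rw [pvKey_spec]; simp [he, hc]; split_ifs <;> simp

theorem key_not_gt_three (v : String) (vw : PySem.Set String) (x : String) :
    pvGt (pvKey v vw x) (3, 0) = false := by
  rw [pvKey_spec]; split_ifs <;> simp [pvGt]

theorem key_not_gt_two (v : String) (vw : PySem.Set String) (x : String)
    (he : exP v x = false) : pvGt (pvKey v vw x) (2, 0) = false := by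
  rw [pvKey_spec]; simp [he]; split_ifs <;> simp [pvGt]

theorem pvGt_of_fst_lt (a b : Int × Int) (h : b.1 < a.1) : pvGt a b = true := by
  simp [pvGt]; omega

theorem foldB_skip (v : String) (vw : PySem.Set String) (l : List String)
    (b : String) (k : Int × Int) (h : ∀ x ∈ l, pvGt (pvKey v vw x) k = false) :
    l.foldl (stepB v vw) (b, k) = (b, k) := by
  induction l with
  | nil => rfl
  | cons x xs ih =>
    have hx := h x (by simp)
    simp only [List.foldl_cons, stepB, hx, Bool.false_eq_true, if_false]
    exact ih (fun y hy => h y (by simp [hy]))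

theorem foldB_fst_le (v : String) (vw : PySem.Set String) (l : List String) (n : Int) :
    ∀ acc : String × (Int × Int), acc.2.1 ≤ n → (∀ x ∈ l, (pvKey v vw x).1 ≤ n) →
    (l.foldl (stepB v vw) acc).2.1 ≤ n := by
  induction l with
  | nil => intro acc h _; simpa using h
  | cons x xs ih =>
    intro acc hacc h
    simp only [List.foldl_cons, stepB]
    split_ifs with hg
    · exact ih _ (h x (by simp)) (fun y hy => h y (by simp [hy]))
    · exact ih _ hacc (fun y hy => h y (by simp [hy]))

theorem ovC_nonneg (vw : PySem.Set String) (x : String) : 0 ≤ ovC vw x := by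
  unfold ovC PySem.Set.len; positivity

theorem fold_rel (v : String) (vw : PySem.Set String) (l : List String)
    (h : ∀ x ∈ l, exP v x = false ∧ coP v x = false) :
    ∀ (b : String) (s : Int), 0 ≤ s →
    l.foldl (stepB v vw) (b, ((if 0 < s then 1 else 0), s))
      = ((l.foldl (stepA vw) (b, s)).1,
         ((if 0 < (l.foldl (stepA vw) (b, s)).2 then 1 else 0),
          (l.foldl (stepA vw) (b, s)).2)) := by
  induction l with
  | nil => intro b s _; rfl
  | cons x xs ih =>
    intro b s hs0
    obtain ⟨he, hc⟩ := h x (by simp)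
    have hxs : ∀ y ∈ xs, exP v y = false ∧ coP v y = false := fun y hy => h y (by simp [hy])
    have hcn := ovC_nonneg vw x
    have hk : pvKey v vw x = if 0 < ovC vw x then (1, ovC vw x) else (0, 0) := by
      rw [pvKey_spec]; simp [he, hc]
    simp only [List.foldl_cons, stepB, stepA, hk]
    by_cases hcx : 0 < ovC vw x
    · rw [if_pos hcx]
      by_cases hgt : ovC vw x > s
      · have hb : pvGt (1, ovC vw x) ((if 0 < s then 1 else 0), s) = true := by
          simp [pvGt]; split_ifs <;> simp; omega
        rw [if_pos hb]; simp only [if_pos hgt]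
        have := ih hxs x (ovC vw x) hcn
        rw [if_pos hcx] at this
        exact this
      · have hb : pvGt (1, ovC vw x) ((if 0 < s then 1 else 0), s) = false := by
          have hs : 0 < s := by omega
          simp [pvGt, hs]; omega
        rw [if_neg (by simp [hb])]; simp only [if_neg hgt]
        exact ih hxs b s hs0
    · have hb : pvGt (if 0 < ovC vw x then (1, ovC vw x) else (0, 0))
          ((if 0 < s then 1 else 0), s) = false := by
        simp [pvGt, hcx]; split_ifs <;> omega
      have hgt : ¬ ovC vw x > s := by omega
      rw [if_neg (by simp [hb])]; simp only [if_neg hgt]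
      exact ih hxs b s hs0

-- ===== VERDICT (by name: the statement is the Claim_ definition above) =====
theorem best_option_match_py_spec : Claim_equal_best_option_match_py := by
  intro value options _
  unfold Spec_best_option_match_py best_option_match_py best_option_match_py_alt
  by_cases h0 : value = "" ∨ options = []
  · simp [h0]
  simp only [h0, if_false]
  set v := PySem.Str.strip (PySem.Str.lower value) with hv
  set vw : PySem.Set String := PySem.Set.ofList (PySem.Str.split₀ v) with hvw
  -- the two ports' fold bodies are definitionally stepB / stepA
  show (match options.find? (exP v) with
      | some opt => opt
      | none => match options.find? (coP v) with
        | some opt => opt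
        | none =>
          let r := options.foldl (stepA vw) ("", (0 : Int))
          if r.2 > 0 then r.1 else "")
    = (let r := options.foldl (stepB v vw) ("", (0, 0)); if pvGt r.2 (0, 0) then r.1 else "")
  cases hE : options.find? (exP v) with
  | some o =>
    -- case 1: an exact match; B's single pass also selects the first exact match
    obtain ⟨hpo, l₁, l₂, hsplit, hpre⟩ := List.find?_eq_some_iff_append.mp hE
    simp only [hsplit, List.foldl_append, List.foldl_cons]
    have hacc1 : (l₁.foldl (stepB v vw) ("", (0, 0))).2.1 ≤ 2 := by
      apply foldB_fst_le v vw l₁ 2 _ (by norm_num)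
      intro x hx
      rw [pvKey_spec]
      have : exP v x = false := by simpa using hpre x hx
      simp [this]; split_ifs <;> simp
    have hko : pvKey v vw o = (3, 0) := by rw [pvKey_spec]; simp [hpo]
    have hgt : pvGt (pvKey v vw o) (l₁.foldl (stepB v vw) ("", (0, 0))).2 = true := by
      rw [hko]; exact pvGt_of_fst_lt _ _ (by omega)
    have hstep : stepB v vw (l₁.foldl (stepB v vw) ("", (0, 0))) o = (o, (3, 0)) := by
      simp only [stepB]; rw [hko] at hgt ⊢; rw [if_pos hgt]
    rw [hstep, foldB_skip v vw l₂ o (3, 0) (fun x _ => key_not_gt_three v vw x)]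
    simp [pvGt]
  | none =>
    have hnoex : ∀ x ∈ options, exP v x = false := by
      intro x hx; simpa using List.find?_eq_none.mp hE x hx
    cases hC : options.find? (coP v) with
    | some o =>
      -- case 2: no exact match, a containment match; B selects the first containment
      obtain ⟨hpo, l₁, l₂, hsplit, hpre⟩ := List.find?_eq_some_iff_append.mp hC
      have hmemo : o ∈ options := by rw [hsplit]; simp
      simp only [hsplit, List.foldl_append, List.foldl_cons]
      have hacc1 : (l₁.foldl (stepB v vw) ("", (0, 0))).2.1 ≤ 1 := by
        apply foldB_fst_le v vw l₁ 1 _ (by norm_num)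
        intro x hx
        have hxo : x ∈ options := by rw [hsplit]; simp [hx]
        exact key_fst_le_one v vw x (hnoex x hxo) (by simpa using hpre x hx)
      have hko : pvKey v vw o = (2, 0) := by
        rw [pvKey_spec]; simp [hnoex o hmemo, hpo]
      have hgt : pvGt (pvKey v vw o) (l₁.foldl (stepB v vw) ("", (0, 0))).2 = true := by
        rw [hko]; exact pvGt_of_fst_lt _ _ (by omega)
      have hstep : stepB v vw (l₁.foldl (stepB v vw) ("", (0, 0))) o = (o, (2, 0)) := by
        simp only [stepB]; rw [hko] at hgt ⊢; rw [if_pos hgt]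
      rw [hstep, foldB_skip v vw l₂ o (2, 0)
        (fun x hx => key_not_gt_two v vw x (hnoex x (by rw [hsplit]; simp [hx])))]
      simp [pvGt]
    | none =>
      -- case 3: word-overlap scoring; B's pass simulates A's scoring loop
      have hnoco : ∀ x ∈ options, coP v x = false := by
        intro x hx; simpa using List.find?_eq_none.mp hC x hx
      have := fold_rel v vw options (fun x hx => ⟨hnoex x hx, hnoco x hx⟩) "" 0 le_rfl
      simp only [lt_irrefl, if_false] at this
      rw [this]
      by_cases hs : 0 < (options.foldl (stepA vw) ("", (0 : Int))).2
      · simp [hs, pvGt]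
      · simp [hs, pvGt]
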